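-- pv_equiv track=rewrite | github.com/JustbeWater/password_producer | password.py | generate_passwords_by_mask
-- ===== SOURCE A (Python) =====
-- import itertools
--
-- def generate_passwords_by_mask(mask, charset):
--     # 根据掩码生成所有可能的密码
--     positions = [i for i, char in enumerate(mask) if char == '?']
--     fixed_chars = [char for char in mask if char != '?']
--
--     for combination in itertools.product(charset, repeat=len(positions)):
--         password = list(fixed_chars)
--         for i, char in zip(positions, combination):
--             password.insert(i, char)
--         yield ''.join(password)
-- ===== SOURCE B (Python) =====
-- import itertools
--
-- def generate_passwords_by_mask(mask, charset):
--     # Split the mask into literal segments; each gap between segments is one '?' slot.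
--     parts = mask.split('?')
--     for combination in itertools.product(charset, repeat=len(parts) - 1):
--         yield parts[0] + ''.join(c + p for c, p in zip(combination, parts[1:]))
-- ===== Notes on version B (the rewrite author's own statement) =====
-- stated objective: simpler
-- what changed: B splits the mask once on '?' into literal segments and builds each password by concatenating segments with the combination characters, instead of A's per-password fixed-chars list copy with repeated positional list.insert.
import Mathlib
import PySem

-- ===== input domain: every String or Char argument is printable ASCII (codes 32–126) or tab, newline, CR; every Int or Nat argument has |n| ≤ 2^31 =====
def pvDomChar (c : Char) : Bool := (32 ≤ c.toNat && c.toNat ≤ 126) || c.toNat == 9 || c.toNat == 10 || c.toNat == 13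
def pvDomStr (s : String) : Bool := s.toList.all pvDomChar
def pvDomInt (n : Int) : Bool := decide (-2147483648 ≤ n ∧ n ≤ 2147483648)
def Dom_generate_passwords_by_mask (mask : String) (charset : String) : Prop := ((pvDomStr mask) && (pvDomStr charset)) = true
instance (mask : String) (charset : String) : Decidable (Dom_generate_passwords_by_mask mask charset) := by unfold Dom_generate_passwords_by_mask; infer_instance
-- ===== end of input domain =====

-- B replaces A's index/insert bookkeeping by splitting the mask on '?' and concatenating
-- the literal segments with each charset combination (objective: simpler decomposition, same cost).

-- itertools.product(charset, repeat=n), in itertools order (first coordinate varies slowest);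
-- used by both Pythons via the same library call.
def pvProduct (cs : List Char) : Nat → List (List Char)
  | 0 => [[]]
  | n + 1 => cs.flatMap (fun c => (pvProduct cs n).map (fun t => c :: t))

-- ===== PORT A =====
-- ''.join of a list of single characters is ported as String.mk.
def generate_passwords_by_mask (mask : String) (charset : String) : List String :=
  let ml := mask.toList
  let positions : List Int :=
    (PySem.List.enumerate ml).filterMap (fun p => if p.2 = '?' then some p.1 else none)
  let fixed_chars : List Char := ml.filter (fun c => !(c = '?'))
  (pvProduct charset.toList positions.length).map (fun combination =>
    String.mk ((positions.zip combination).foldl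
      (fun password ic => PySem.List.insert password ic.1 ic.2) fixed_chars))

-- ===== PORT B =====
-- mask.split('?') with a one-character separator is ported as List.splitOn '?' on the char list.
def generate_passwords_by_mask_alt (mask : String) (charset : String) : List String :=
  let parts : List (List Char) := mask.toList.splitOn '?'
  (pvProduct charset.toList (parts.length - 1)).map (fun combination =>
    String.mk (parts.headI ++ ((combination.zip parts.tail).map (fun cp => cp.1 :: cp.2)).flatten))

-- ===== PRECONDITION & SPEC =====
def Spec_generate_passwords_by_mask (mask : String) (charset : String) (out : List String) : Prop := out = generate_passwords_by_mask_alt mask charset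
instance (mask : String) (charset : String) (out : List String) : Decidable (Spec_generate_passwords_by_mask mask charset out) := by unfold Spec_generate_passwords_by_mask; infer_instance

-- ===== CLAIM (what is proved, stated in full; the proofs are below) =====
def Claim_equal_generate_passwords_by_mask : Prop := ∀ (mask : String) (charset : String), Dom_generate_passwords_by_mask mask charset → Spec_generate_passwords_by_mask mask charset (generate_passwords_by_mask mask charset)

-- ===== LEMMAS AND PROOFS =====

-- the mask with its '?' slots filled left to right from comb (both programs compute this)
def pvFill : List Char → List Char → List Char
  | [], _ => []
  | a :: l, cs =>
    if a = '?' then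
      match cs with
      | [] => pvFill l []
      | c :: cs' => c :: pvFill l cs'
    else a :: pvFill l cs

-- A's position list, generalized over the enumerate start
def pvPosFrom (s : Int) (l : List Char) : List Int :=
  (PySem.List.enumerate l s).filterMap (fun p => if p.2 = '?' then some p.1 else none)

theorem pvPosFrom_nil (s : Int) : pvPosFrom s [] = [] := rfl

theorem pvPosFrom_cons (s : Int) (a : Char) (l : List Char) :
    pvPosFrom s (a :: l) = if a = '?' then s :: pvPosFrom (s + 1) l else pvPosFrom (s + 1) l := by
  simp only [pvPosFrom, PySem.List.enumerate_cons, List.filterMap_cons]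
  split_ifs <;> simp_all

theorem pvPosFrom_length (s : Int) (l : List Char) :
    (pvPosFrom s l).length = l.countP (fun c => c = '?') := by
  induction l generalizing s with
  | nil => rfl
  | cons a l ih =>
    rw [pvPosFrom_cons]
    by_cases h : a = '?' <;> simp [h, ih, List.countP_cons]

theorem pvSplit_length (l : List Char) :
    (l.splitOn '?').length = l.countP (fun c => c = '?') + 1 := by
  induction l with
  | nil => rfl
  | cons a l ih =>
    by_cases h : a = '?'
    · subst h
      simp [List.splitOn, List.splitOnP_cons, List.countP_cons] at *
      omega
    · simp only [List.splitOn, List.splitOnP_cons, beq_iff_eq, h, if_neg, not_false_iff]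
      cases hx : List.splitOnP (fun x => x == '?') l with
      | nil => exact absurd hx (List.splitOnP_ne_nil _ _)
      | cons p ps =>
        simp only [List.splitOn, hx, List.length_cons] at ih
        simp [List.modifyHead, List.countP_cons, h]
        omega

theorem pvSplitOn_qmark (l : List Char) :
    ('?' :: l).splitOn '?' = [] :: l.splitOn '?' := by
  simp [List.splitOn, List.splitOnP_cons]

theorem pvSplitOn_other (a : Char) (l : List Char) (h : a ≠ '?') :
    (a :: l).splitOn '?' = (a :: ((l.splitOn '?').headI)) :: (l.splitOn '?').tail := by
  simp only [List.splitOn, List.splitOnP_cons, beq_iff_eq, h, if_neg, not_false_iff]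
  cases hx : List.splitOnP (fun x => x == '?') l with
  | nil => exact absurd hx (List.splitOnP_ne_nil _ _)
  | cons p ps => simp [List.modifyHead]

theorem pvProduct_mem_length (cs : List Char) (n : Nat) (t : List Char) (h : t ∈ pvProduct cs n) :
    t.length = n := by
  induction n generalizing t with
  | zero => simp [pvProduct] at h; simp [h]
  | succ n ih =>
    simp only [pvProduct, List.mem_flatMap, List.mem_map] at h
    obtain ⟨c, _, t', ht', rfl⟩ := h
    simp [ih t' ht']

-- B's per-combination construction equals pvFill
theorem pvB_fill (l comb : List Char) (h : comb.length = l.countP (fun c => c = '?')) :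
    (l.splitOn '?').headI ++ ((comb.zip (l.splitOn '?').tail).map (fun cp => cp.1 :: cp.2)).flatten
      = pvFill l comb := by
  induction l generalizing comb with
  | nil =>
    simp [List.countP_nil] at h
    simp [h, List.splitOn, pvFill]
  | cons a l ih =>
    by_cases ha : a = '?'
    · subst ha
      rw [pvSplitOn_qmark]
      simp [List.countP_cons] at h
      cases comb with
      | nil => simp at h
      | cons c cs =>
        simp at h
        cases hx : l.splitOn '?' with
        | nil => exact absurd hx (List.splitOnP_ne_nil _ _)
        | cons p ps =>
          have ih' := ih cs (by omega)
          rw [hx] at ih'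
          simp only [List.headI, List.tail, List.zip_cons_cons, List.map_cons,
            List.flatten_cons, List.nil_append, pvFill, if_pos rfl]
          simpa using ih'
    · rw [pvSplitOn_other a l ha]
      simp only [List.countP_cons, if_neg ha, decide_eq_true_eq] at h
      have h' : comb.length = l.countP (fun c => c = '?') := by
        simpa [ha] using h
      have ih' := ih comb h'
      simp [pvFill, ha, List.cons_append, ← ih']

-- A's insert loop equals pvFill, generalized over an untouched pfx
theorem pvA_fill (l : List Char) (comb pfx : List Char)
    (h : comb.length = l.countP (fun c => c = '?')) :
    ((pvPosFrom (pfx.length : Int) l).zip comb).foldl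
        (fun password ic => PySem.List.insert password ic.1 ic.2)
        (pfx ++ l.filter (fun c => !(c = '?')))
      = pfx ++ pvFill l comb := by
  induction l generalizing comb pfx with
  | nil => simp [pvPosFrom_nil, pvFill]
  | cons a l ih =>
    rw [pvPosFrom_cons]
    by_cases ha : a = '?'
    · subst ha
      rw [if_pos rfl]
      simp [List.countP_cons] at h
      cases comb with
      | nil => simp at h
      | cons c cs =>
        simp at h
        have hins : PySem.List.insert (pfx ++ List.filter (fun c => !decide (c = '?')) l)
            ((pfx.length : Int)) c = (pfx ++ [c]) ++ List.filter (fun c => !decide (c = '?')) l := by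
          rw [PySem.List.insert_natCast _ _ _ (by simp)]
          simp
        have ih' := ih cs (pfx ++ [c]) (by omega)
        rw [show ((pfx ++ [c]).length : Int) = (pfx.length : Int) + 1 by simp] at ih'
        have hfil : List.filter (fun c => !decide (c = '?')) ('?' :: l)
            = List.filter (fun c => !decide (c = '?')) l := by simp
        rw [hfil, List.zip_cons_cons, List.foldl_cons, hins, ih']
        simp [pvFill]
    · rw [if_neg ha]
      simp [List.countP_cons, ha] at h
      have ih' := ih comb (pfx ++ [a]) h
      rw [show ((pfx ++ [a]).length : Int) = (pfx.length : Int) + 1 by simp] at ih'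
      have hfil : pfx ++ List.filter (fun c => !decide (c = '?')) (a :: l)
          = (pfx ++ [a]) ++ List.filter (fun c => !decide (c = '?')) l := by simp [ha]
      rw [hfil, ih']
      simp [pvFill, ha]

-- ===== VERDICT (by name: the statement is the Claim_ definition above) =====
theorem generate_passwords_by_mask_spec : Claim_equal_generate_passwords_by_mask := by
  intro mask charset _
  unfold Spec_generate_passwords_by_mask generate_passwords_by_mask generate_passwords_by_mask_alt
  have hn : (mask.toList.splitOn '?').length - 1
      = ((PySem.List.enumerate mask.toList).filterMap
          (fun p => if p.2 = '?' then some p.1 else none)).length := by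
    have := pvPosFrom_length 0 mask.toList
    simp only [pvPosFrom] at this
    rw [pvSplit_length, this]
    omega
  simp only [← hn]
  apply List.map_congr_left
  intro comb hcomb
  have hlen : comb.length = mask.toList.countP (fun c => c = '?') := by
    have := pvProduct_mem_length _ _ _ hcomb
    rw [this, pvSplit_length]
    omega
  have ha := pvA_fill mask.toList comb [] hlen
  have hb := pvB_fill mask.toList comb hlen
  simp only [List.length_nil, Int.natCast_zero, List.nil_append] at ha
  have h0 : pvPosFrom 0 mask.toList
      = (PySem.List.enumerate mask.toList).filterMap (fun p => if p.2 = '?' then some p.1 else none) := rfl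
  rw [← h0, ha, ← hb]
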